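-- pv_equiv track=rewrite | github.com/pedroarthur-almeida/flyfood | fly-f/main.py | calcular_rotas
-- ===== SOURCE A (Python) =====
-- def distancia(a, b):
--     # Soma das diferenças absolutas entre as coordenadas
--     return abs(a[0] - b[0]) + abs(a[1] - b[1])
--
-- def gerar_permutacoes(seq):
--     #Caso base: lista vazia
--     if len(seq) == 0:
--         return [[]]
--     #Caso base: lista com um único elemento
--     if len(seq) == 1:
--         return [seq[:]]
--
--     perms = []
--     #Gera todas as combinações possíveis
--     for i in range(len(seq)):
--         atual = seq[i]
--         resto = seq[:i] + seq[i + 1:]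
--         for p in gerar_permutacoes(resto):
--             perms.append([atual] + p)
--     return perms
--
-- def calcular_rotas(pontos):
--     #Cria um dicionário apenas com os pontos de entrega (exclui o R)
--     entregas = {k: v for k, v in pontos.items() if k != "R"}
--     letras = list(entregas.keys())
--
--     #Verifica se há entregas
--     if not letras:
--         raise ValueError("Nenhum ponto de entrega encontrado.")
--
--     rotas = []
--     #Gera todas as permutações de entrega
--     for perm in gerar_permutacoes(letras):
--         custo = 0
--         #Adiciona o ponto inicial e final (R)
--         rota_completa = ["R"] + list(perm) + ["R"]
--         #Soma o custo total da rota
--         for i in range(len(rota_completa) - 1):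
--             a, b = rota_completa[i], rota_completa[i + 1]
--             custo += distancia(pontos[a], pontos[b])
--         rotas.append((rota_completa, custo))
--
--     #Ordena as rotas pelo menor custo
--     rotas.sort(key=lambda x: x[1])
--     return rotas
-- ===== SOURCE B (Python) =====
-- def distancia(a, b):
--     return abs(a[0] - b[0]) + abs(a[1] - b[1])
--
-- def calcular_rotas(pontos):
--     letras = [k for k in pontos if k != "R"]
--
--     if not letras:
--         raise ValueError("Nenhum ponto de entrega encontrado.")
--
--     # Build all permutations iteratively, level by level: each state is
--     # (prefix chosen so far, letters still unused).  Expanding the unused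
--     # letters left to right yields the same positional-lexicographic order
--     # as the recursive generator.
--     states = [([], letras)]
--     for _ in range(len(letras)):
--         states = [(prefix + [x], rest[:j] + rest[j + 1:])
--                   for prefix, rest in states
--                   for j, x in enumerate(rest)]
--
--     rotas = []
--     for prefix, _ in states:
--         rota = ["R"] + prefix + ["R"]
--         custo = sum(distancia(pontos[a], pontos[b])
--                     for a, b in zip(rota, rota[1:]))
--         rotas.append((rota, custo))
--
--     return sorted(rotas, key=lambda r: r[1])
-- ===== Notes on version B (the rewrite author's own statement) =====
-- stated objective: alternative
-- what changed: The recursive permutation generator is replaced by an iterative level-by-level expansion of (prefix, remaining) states, and the indexed cost loop by a sum over zipped adjacent pairs; routes are built by comprehension and sorted with sorted() instead of append+in-place sort.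
import Mathlib
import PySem

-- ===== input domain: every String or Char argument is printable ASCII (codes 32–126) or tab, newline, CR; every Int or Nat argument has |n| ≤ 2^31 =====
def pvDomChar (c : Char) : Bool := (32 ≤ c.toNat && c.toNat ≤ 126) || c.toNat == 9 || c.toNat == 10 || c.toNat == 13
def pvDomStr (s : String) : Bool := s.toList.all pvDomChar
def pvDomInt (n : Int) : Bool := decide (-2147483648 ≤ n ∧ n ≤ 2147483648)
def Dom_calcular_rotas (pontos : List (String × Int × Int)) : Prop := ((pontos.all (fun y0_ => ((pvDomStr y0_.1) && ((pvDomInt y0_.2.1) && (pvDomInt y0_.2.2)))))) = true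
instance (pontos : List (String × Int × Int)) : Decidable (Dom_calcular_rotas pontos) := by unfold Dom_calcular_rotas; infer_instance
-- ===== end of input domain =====

-- B replaces A's recursive permutation generator by an iterative level-by-level
-- expansion of (prefix, remaining) states and the indexed cost loop by a sum over
-- adjacent pairs (zip); objective: alternative decomposition, same factorial cost.

-- ===== PORT A =====
def distancia (a b : Int × Int) : Int := |a.1 - b.1| + |a.2 - b.2|

-- seq[:i] + seq[i+1:] is ported as take/drop (i is a range(len(seq)) index, so both
-- slices are exactly take i / drop (i+1)); seq[i] is ported as getD (in range).
def gerar_permutacoes (seq : List String) : List (List String) :=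
  if seq.length = 0 then [[]]
  else if seq.length = 1 then [seq]
  else
    (List.range seq.length).attach.foldl
      (fun perms i =>
        (gerar_permutacoes (seq.take i.1 ++ seq.drop (i.1 + 1))).foldl
          (fun acc p => acc ++ [seq.getD i.1 "" :: p]) perms)
      []
termination_by seq.length
decreasing_by
  have hi := List.mem_range.mp i.2
  simp only [List.length_append, List.length_take, List.length_drop]
  omega

-- pontos[a] is d.getD a (0,0): a KeyError ("R" absent) is excluded by Pre_, under
-- which every looked-up key is a key of d, so the default is never read.
def calcular_rotas (pontos : List (String × Int × Int)) : List (List String × Int) :=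
  let d := PySem.Dict.ofList pontos
  let entregas := d.items.foldl
    (fun e kv => if kv.1 != "R" then e.insert kv.1 kv.2 else e) PySem.Dict.empty
  let letras := entregas.keys
  if letras.isEmpty then []   -- Python raises ValueError here; excluded by Pre_
  else
    let rotas := (gerar_permutacoes letras).foldl
      (fun rotas perm =>
        let rota_completa := ["R"] ++ perm ++ ["R"]
        let custo := (List.range (rota_completa.length - 1)).foldl
          (fun custo i =>
            custo + distancia (d.getD (rota_completa.getD i "") (0, 0))
                              (d.getD (rota_completa.getD (i + 1) "") (0, 0))) 0
        rotas ++ [(rota_completa, custo)])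
      []
    PySem.List.sorted rotas (fun x => x.2) false

-- ===== PORT B =====
def calcular_rotas_alt (pontos : List (String × Int × Int)) : List (List String × Int) :=
  let d := PySem.Dict.ofList pontos
  let letras := d.keys.filter (fun k => k != "R")
  if letras.isEmpty then []   -- Python raises ValueError here; excluded by Pre_
  else
    let states := (List.range letras.length).foldl
      (fun sts _ => sts.flatMap (fun s =>
        (PySem.List.enumerate s.2).map (fun jx =>
          (s.1 ++ [jx.2],
           PySem.List.slice s.2 none (some jx.1) ++ PySem.List.slice s.2 (some (jx.1 + 1)) none))))
      [(([] : List String), letras)]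
    let rotas := states.map (fun s =>
      let rota := ["R"] ++ s.1 ++ ["R"]
      (rota, ((rota.zip rota.tail).map (fun ab =>
        distancia (d.getD ab.1 (0, 0)) (d.getD ab.2 (0, 0)))).sum))
    PySem.List.sorted rotas (fun r => r.2) false

-- ===== PRECONDITION & SPEC =====
-- Pre_ excludes exactly the inputs on which the Python raises: no delivery point
-- besides "R" (ValueError), or "R" itself missing (KeyError on pontos["R"]).
def Pre_calcular_rotas (pontos : List (String × Int × Int)) : Prop :=
  "R" ∈ pontos.map Prod.fst ∧ ∃ p ∈ pontos, p.1 ≠ "R"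
instance (pontos : List (String × Int × Int)) : Decidable (Pre_calcular_rotas pontos) := by
  unfold Pre_calcular_rotas; infer_instance

def pvWitness_calcular_rotas : (List (String × Int × Int)) := [("R", 0, 0), ("A", 1, 2), ("B", 3, 1)]

def Spec_calcular_rotas (pontos : List (String × Int × Int)) (out : List (List String × Int)) : Prop := out = calcular_rotas_alt pontos
instance (pontos : List (String × Int × Int)) (out : List (List String × Int)) : Decidable (Spec_calcular_rotas pontos out) := by unfold Spec_calcular_rotas; infer_instance

-- ===== CLAIM (what is proved, stated in full; the proofs are below) =====
def Claim_equal_calcular_rotas : Prop := ∀ (pontos : List (String × Int × Int)), Dom_calcular_rotas pontos → Pre_calcular_rotas pontos → Spec_calcular_rotas pontos (calcular_rotas pontos)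

-- ===== LEMMAS AND PROOFS =====

-- canonical "pick one element, keep the rest" list, in left-to-right order
def picks (seq : List String) : List (String × List String) :=
  match seq with
  | [] => []
  | x :: xs => (x, xs) :: (picks xs).map (fun p => (p.1, x :: p.2))

-- canonical permutations with fuel (called with fuel = seq.length)
def cperms : Nat → List String → List (List String)
  | 0, _ => [[]]
  | n + 1, seq => (picks seq).flatMap (fun p => (cperms n p.2).map (p.1 :: ·))

theorem picks_eq_range (seq : List String) :
    picks seq = (List.range seq.length).map
      (fun i => (seq.getD i "", seq.take i ++ seq.drop (i + 1))) := by
  induction seq with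
  | nil => simp [picks]
  | cons x xs ih =>
    simp [picks, ih, List.range_succ_eq_map, List.map_map, Function.comp_def, Nat.succ_eq_add_one]

theorem picks_snd_length {seq : List String} {p : String × List String}
    (h : p ∈ picks seq) : p.2.length + 1 = seq.length := by
  rw [picks_eq_range] at h
  simp only [List.mem_map, List.mem_range] at h
  obtain ⟨i, hi, rfl⟩ := h
  simp only [List.length_append, List.length_take, List.length_drop]
  omega

theorem flatMap_attach {α β : Type} (l : List α) (f : α → List β) :
    l.attach.flatMap (fun a => f a.1) = l.flatMap f := by
  conv_rhs => rw [← List.attach_map_subtype_val l]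
  rw [List.flatMap_map]

theorem gp_eq_cperms : ∀ (n : Nat) (seq : List String), seq.length = n →
    gerar_permutacoes seq = cperms n seq := by
  intro n
  induction n using Nat.strong_induction_on with
  | _ n ih =>
    intro seq hlen
    rw [gerar_permutacoes]
    by_cases h0 : seq.length = 0
    · have : seq = [] := List.length_eq_zero_iff.mp h0
      subst this
      simp at hlen
      simp [← hlen, cperms]
    · by_cases h1 : seq.length = 1
      · obtain ⟨x, rfl⟩ := List.length_eq_one_iff.mp h1
        simp only [List.length_cons, List.length_nil] at hlen
        simp [h1, ← hlen, cperms, picks]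
      · simp only [h0, h1, if_false]
        have hbody : ∀ (perms : List (List String)) (i : {x // x ∈ List.range seq.length}),
            (gerar_permutacoes (seq.take i.1 ++ seq.drop (i.1 + 1))).foldl
              (fun acc p => acc ++ [seq.getD i.1 "" :: p]) perms
            = perms ++ (gerar_permutacoes (seq.take i.1 ++ seq.drop (i.1 + 1))).map
                (seq.getD i.1 "" :: ·) := by
          intro perms i
          exact PySem.List.foldl_append_singleton_eq_map _ _ _
        simp only [hbody]
        rw [PySem.List.foldl_append_eq_flatMap
          (fun i : {x // x ∈ List.range seq.length} =>
            (gerar_permutacoes (seq.take i.1 ++ seq.drop (i.1 + 1))).map (seq.getD i.1 "" :: ·))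
          (List.range seq.length).attach []]
        rw [List.nil_append]
        obtain ⟨m, rfl⟩ : ∃ m, n = m + 1 := by
          refine ⟨n - 1, ?_⟩; omega
        have hcong : ∀ i ∈ (List.range seq.length).attach,
            (gerar_permutacoes (seq.take i.1 ++ seq.drop (i.1 + 1))).map (seq.getD i.1 "" :: ·)
            = (cperms m (seq.take i.1 ++ seq.drop (i.1 + 1))).map (seq.getD i.1 "" :: ·) := by
          intro i _
          have hi : i.1 < seq.length := List.mem_range.mp i.2
          have hl : (seq.take i.1 ++ seq.drop (i.1 + 1)).length = m := by
            simp only [List.length_append, List.length_take, List.length_drop]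
            omega
          rw [ih m (by omega) _ hl]
        rw [List.flatMap_congr hcong]
        rw [flatMap_attach (List.range seq.length)
          (fun i => (cperms m (seq.take i ++ seq.drop (i + 1))).map (seq.getD i "" :: ·))]
        simp only [cperms, picks_eq_range, List.flatMap_map]

-- one expansion step of B's state list
def pstep (S : List (List String × List String)) : List (List String × List String) :=
  S.flatMap (fun s => (picks s.2).map (fun p => (s.1 ++ [p.1], p.2)))

theorem pstep_eq_body (S : List (List String × List String)) :
    S.flatMap (fun s =>
        (PySem.List.enumerate s.2).map (fun jx =>
          (s.1 ++ [jx.2],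
           PySem.List.slice s.2 none (some jx.1) ++ PySem.List.slice s.2 (some (jx.1 + 1)) none)))
      = pstep S := by
  unfold pstep
  congr 1
  funext s
  rw [PySem.List.enumerate_eq_map_pyRange s.2 "", picks_eq_range]
  have : PySem.List.len s.2 = ((s.2.length : Nat) : Int) := by simp [PySem.List.len]
  rw [this, PySem.List.pyRange_zero_natCast]
  simp only [List.map_map, Function.comp_def]
  apply List.map_congr_left
  intro k _
  have h1 : ((k : Int) + 1) = ((k + 1 : Nat) : Int) := by push_cast; ring
  rw [h1, PySem.List.slice_to_natCast, PySem.List.slice_from_natCast]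
  simp [PySem.List.pyGetD_natCast]

theorem expand (n : Nat) : ∀ (S : List (List String × List String)),
    (∀ s ∈ S, s.2.length = n) →
    (List.range n).foldl (fun sts _ => pstep sts) S
      = S.flatMap (fun s => (cperms n s.2).map (fun p => (s.1 ++ p, ([] : List String)))) := by
  induction n with
  | zero =>
    intro S h
    simp only [List.range_zero, List.foldl_nil, cperms, List.map_cons, List.map_nil,
      List.append_nil]
    rw [← List.map_eq_flatMap]
    conv_lhs => rw [← List.map_id S]
    apply List.map_congr_left
    intro s hs
    have := h s hs
    cases s with
    | mk a b => simp at this; simp [this]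
  | succ n ih =>
    intro S h
    have hstep : (List.range (n + 1)).foldl (fun sts _ => pstep sts) S
        = (List.range n).foldl (fun sts _ => pstep sts) (pstep S) := by
      rw [List.range_succ_eq_map]
      simp [List.foldl_map]
    rw [hstep]
    rw [ih (pstep S) ?hlen]
    case hlen =>
      intro s' hs'
      simp only [pstep, List.mem_flatMap, List.mem_map] at hs'
      obtain ⟨s, hs, p, hp, rfl⟩ := hs'
      have := picks_snd_length hp
      have h2 := h s hs
      simp only at this ⊢
      omega
    unfold pstep
    rw [List.flatMap_assoc]
    apply List.flatMap_congr
    intro s _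
    rw [List.flatMap_map]
    show _ = (cperms (n+1) s.2).map (fun p => (s.1 ++ p, ([] : List String)))
    simp only [cperms, List.map_flatMap, List.map_map]
    apply List.flatMap_congr
    intro p _
    apply List.map_congr_left
    intro q _
    simp [List.append_assoc]

theorem pairs_eq (l : List String) :
    (List.range (l.length - 1)).map (fun i => (l.getD i "", l.getD (i + 1) "")) = l.zip l.tail := by
  induction l with
  | nil => simp
  | cons a t ih =>
    cases t with
    | nil => simp
    | cons b t' =>
      have := ih
      simp only [List.length_cons, Nat.add_sub_cancel, List.tail_cons] at this ⊢
      rw [List.range_succ_eq_map]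
      simp only [List.map_cons, List.map_map, List.zip_cons_cons]
      rw [← this]
      simp [Function.comp_def, Nat.succ_eq_add_one]

theorem cost_eq (d : PySem.Dict String (Int × Int)) (l : List String) :
    (List.range (l.length - 1)).foldl
      (fun custo i =>
        custo + distancia (d.getD (l.getD i "") (0, 0)) (d.getD (l.getD (i + 1) "") (0, 0))) 0
    = ((l.zip l.tail).map (fun ab => distancia (d.getD ab.1 (0, 0)) (d.getD ab.2 (0, 0)))).sum := by
  rw [PySem.List.foldl_add (List.range (l.length - 1))
    (fun i => distancia (d.getD (l.getD i "") (0, 0)) (d.getD (l.getD (i + 1) "") (0, 0))) 0]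
  rw [← pairs_eq l, List.map_map]
  simp [Function.comp_def]

theorem letras_eq (d : PySem.Dict String (Int × Int)) (hnd : d.keys.Nodup) :
    (d.items.foldl (fun e kv => if kv.1 != "R" then e.insert kv.1 kv.2 else e)
      PySem.Dict.empty).keys = d.keys.filter (fun k => k != "R") := by
  rw [PySem.List.foldl_if_eq_foldl_filter (fun kv => kv.1 != "R")
    (fun (e : PySem.Dict String (Int × Int)) kv => e.insert kv.1 kv.2) d.items PySem.Dict.empty]
  have hfresh : ∀ a ∈ d.items.filter (fun kv => kv.1 != "R"),
      (PySem.Dict.empty : PySem.Dict String (Int × Int)).contains a.1 = false := by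
    intro a _; simp [PySem.Dict.contains_empty]
  have hsub : ((d.items.filter (fun kv => kv.1 != "R")).map Prod.fst).Sublist (d.items.map Prod.fst) :=
    List.Sublist.map _ List.filter_sublist
  have hnodup : ((d.items.filter (fun kv => kv.1 != "R")).map Prod.fst).Nodup := by
    refine List.Nodup.sublist hsub ?_
    simpa [PySem.Dict.keys] using hnd
  have := PySem.Dict.items_foldl_insert_fresh (d.items.filter (fun kv => kv.1 != "R"))
    Prod.fst Prod.snd PySem.Dict.empty hfresh hnodup
  simp only [PySem.Dict.keys] at *
  rw [this]
  simp only [PySem.Dict.empty, List.nil_append, List.map_map]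
  simp [List.filter_map, Function.comp_def]

-- ===== VERDICT (by name: the statement is the Claim_ definition above) =====
theorem calcular_rotas_spec : Claim_equal_calcular_rotas := by
  intro pontos _ _
  unfold Spec_calcular_rotas calcular_rotas calcular_rotas_alt
  simp only []
  have hnd := PySem.Dict.nodup_keys_ofList pontos
  rw [letras_eq (PySem.Dict.ofList pontos) hnd]
  set d := PySem.Dict.ofList pontos with hd
  set letras := d.keys.filter (fun k => k != "R") with hl
  by_cases hemp : letras.isEmpty
  · simp [hemp]
  · simp only [hemp, if_false]
    congr 1
    -- A's route list = B's route list
    rw [gp_eq_cperms letras.length letras rfl]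
    rw [PySem.List.foldl_append_singleton_eq_map
      (fun perm => ((["R"] ++ perm ++ ["R"] : List String),
        (List.range ((["R"] ++ perm ++ ["R"]).length - 1)).foldl
          (fun custo i =>
            custo + distancia (d.getD ((["R"] ++ perm ++ ["R"]).getD i "") (0, 0))
                              (d.getD ((["R"] ++ perm ++ ["R"]).getD (i + 1) "") (0, 0))) 0))
      (cperms letras.length letras) []]
    rw [List.nil_append]
    have hbody : (fun (sts : List (List String × List String)) (_ : Nat) => sts.flatMap (fun s =>
        (PySem.List.enumerate s.2).map (fun jx =>
          (s.1 ++ [jx.2],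
           PySem.List.slice s.2 none (some jx.1) ++ PySem.List.slice s.2 (some (jx.1 + 1)) none))))
        = (fun sts _ => pstep sts) := by
      funext sts _
      exact pstep_eq_body sts
    rw [hbody]
    rw [expand letras.length [([], letras)] (by intro s hs; simp at hs; subst hs; rfl)]
    simp only [List.flatMap_cons, List.flatMap_nil, List.append_nil, ← List.map_eq_flatMap, List.map_map]
    congr 1
    apply List.map_congr_left
    intro p _
    simp only [Function.comp_def, List.nil_append]
    rw [cost_eq d (["R"] ++ p ++ ["R"])]
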